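-- pv_equiv track=rewrite | github.com/hwajlee/TIL | algorithms/programmers/불량사용자.py | dfs
-- ===== SOURCE A (Python) =====
-- def dfs (matrix):
--     paths = []
--     if len(matrix) == 1:
--         for item in matrix[0]:
--             paths.append([item])
--     else:
--         sub_paths = dfs(matrix[1:])
--         for item in matrix[0]:
--             for sub_path in sub_paths:
--                 if item not in sub_path:
--                     paths.append([item] + sub_path)
--     return paths
-- ===== SOURCE B (Python) =====
-- def dfs(matrix):
--     # Bottom-up: start from the last row and extend paths leftwards.
--     paths = [[item] for item in matrix[-1]]
--     for row in reversed(matrix[:-1]):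
--         new_paths = []
--         for item in row:
--             for sub in paths:
--                 if item not in sub:
--                     new_paths.append([item] + sub)
--         paths = new_paths
--     return paths
-- ===== Notes on version B (the rewrite author's own statement) =====
-- stated objective: alternative
-- what changed: Replaces A's top-down recursion (recurse on the tail, then prepend the head row's items) by an explicit bottom-up loop that seeds paths from the last row and folds the remaining rows in reverse with an accumulator.
import Mathlib
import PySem

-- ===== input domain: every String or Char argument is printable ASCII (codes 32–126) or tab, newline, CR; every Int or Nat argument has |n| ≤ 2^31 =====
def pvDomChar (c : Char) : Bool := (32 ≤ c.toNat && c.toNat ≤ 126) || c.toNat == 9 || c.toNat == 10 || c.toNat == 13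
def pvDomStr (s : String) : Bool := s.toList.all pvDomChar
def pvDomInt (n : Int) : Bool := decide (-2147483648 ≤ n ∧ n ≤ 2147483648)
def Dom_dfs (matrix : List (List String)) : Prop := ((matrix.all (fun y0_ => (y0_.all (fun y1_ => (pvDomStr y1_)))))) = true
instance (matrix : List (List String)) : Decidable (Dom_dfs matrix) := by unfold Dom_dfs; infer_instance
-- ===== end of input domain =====

-- B replaces A's top-down recursion by an explicit bottom-up loop (seed from the last row,
-- fold the earlier rows in reverse); objective: alternative decomposition, same cost.


-- ===== PORT A =====
-- top-down recursion: recurse on the tail, prepend head-row items that are not in the sub-path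
def dfs : List (List String) → List (List String)
  | [] => []                        -- Python diverges here (RecursionError); excluded by Pre_dfs
  | [row] =>
      row.foldl (fun paths item => paths ++ [[item]]) []
  | row :: rest =>                  -- rest ≠ [] here
      let sub_paths := dfs rest
      row.foldl (fun paths item =>
        sub_paths.foldl (fun paths sub_path =>
          if item ∈ sub_path then paths else paths ++ [item :: sub_path]) paths) []

-- ===== PORT B =====
-- bottom-up loop: paths = [[item] for item in matrix[-1]]; then fold reversed(matrix[:-1])
def dfs_alt (matrix : List (List String)) : List (List String) :=
  match matrix.getLast? with        -- matrix[-1]; none = IndexError, excluded by Pre_dfs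
  | none => []
  | some last =>
      matrix.dropLast.reverse.foldl   -- for row in reversed(matrix[:-1])
        (fun paths row =>
          row.foldl (fun new_paths item =>
            paths.foldl (fun new_paths sub =>
              if item ∈ sub then new_paths else new_paths ++ [item :: sub]) new_paths) [])
        (last.map (fun item => [item]))

-- ===== PRECONDITION & SPEC =====
-- A never returns on the empty matrix (infinite recursion → RecursionError), and B raises IndexError there.
def Pre_dfs (matrix : List (List String)) : Prop := matrix ≠ []
instance (matrix : List (List String)) : Decidable (Pre_dfs matrix) := by unfold Pre_dfs; infer_instance
def pvWitness_dfs : List (List String) := [["a", "b"], ["a", "c"]]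
def Spec_dfs (matrix : List (List String)) (out : List (List String)) : Prop := out = dfs_alt matrix
instance (matrix : List (List String)) (out : List (List String)) : Decidable (Spec_dfs matrix out) := by unfold Spec_dfs; infer_instance

-- ===== CLAIM (what is proved, stated in full; the proofs are below) =====
def Claim_equal_dfs : Prop := ∀ (matrix : List (List String)), Dom_dfs matrix → Pre_dfs matrix → Spec_dfs matrix (dfs matrix)

-- ===== LEMMAS AND PROOFS =====

-- the common one-row extension step both ports perform
def pvStep (paths : List (List String)) (row : List String) : List (List String) :=
  row.flatMap (fun item => (paths.filter (fun sub => !(sub.contains item))).map (item :: ·))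

-- inner loop: 'if item not in sub: out.append([item]+sub)'
theorem inner_fold (item : String) (paths acc : List (List String)) :
    paths.foldl (fun a sub => if item ∈ sub then a else a ++ [item :: sub]) acc
      = acc ++ (paths.filter (fun sub => !(sub.contains item))).map (item :: ·) := by
  induction paths generalizing acc with
  | nil => simp
  | cons s t ih =>
      simp only [List.foldl_cons, List.filter_cons]
      by_cases h : item ∈ s
      · simp [h, ih]
      · simp [h, ih, List.map_cons]

-- outer loop over the row, starting from the empty accumulator
theorem row_fold (paths : List (List String)) (row : List String) :
    row.foldl (fun a item =>
      paths.foldl (fun a sub => if item ∈ sub then a else a ++ [item :: sub]) a) []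
      = pvStep paths row := by
  have h : ∀ (acc : List (List String)),
      row.foldl (fun a item =>
        paths.foldl (fun a sub => if item ∈ sub then a else a ++ [item :: sub]) a) acc
        = acc ++ pvStep paths row := by
    intro acc
    simp only [funext fun a => funext fun item => inner_fold item paths a]
    exact PySem.List.foldl_append_eq_flatMap _ _ _
  simpa using h []

-- A on a multi-row matrix performs pvStep on the recursive result
theorem dfs_cons (row : List String) (rest : List (List String)) (h : rest ≠ []) :
    dfs (row :: rest) = pvStep (dfs rest) row := by
  match rest, h with
  | r :: t, _ =>
      show (row.foldl (fun paths item =>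
          (dfs (r :: t)).foldl (fun paths sub =>
            if item ∈ sub then paths else paths ++ [item :: sub]) paths) []) = _
      exact row_fold _ row

-- B on a multi-row matrix performs pvStep on B of the tail
theorem dfs_alt_cons (row : List String) (rest : List (List String)) (h : rest ≠ []) :
    dfs_alt (row :: rest) = pvStep (dfs_alt rest) row := by
  obtain ⟨last, hl⟩ : ∃ x, rest.getLast? = some x := by
    cases rest with
    | nil => exact absurd rfl h
    | cons a t => exact ⟨(a :: t).getLast (by simp), List.getLast?_eq_some_getLast (by simp)⟩
  have hlast : (row :: rest).getLast? = some last := by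
    rw [List.getLast?_cons, hl]; simp
  have hdrop : (row :: rest).dropLast = row :: rest.dropLast := by
    cases rest with
    | nil => exact absurd rfl h
    | cons a t => rfl
  simp only [dfs_alt, hlast, hl, hdrop, List.reverse_cons, List.foldl_append, List.foldl_cons,
    List.foldl_nil]
  exact row_fold _ row

theorem dfs_eq_alt : ∀ (matrix : List (List String)), matrix ≠ [] → dfs matrix = dfs_alt matrix := by
  intro matrix
  induction matrix with
  | nil => intro h; exact absurd rfl h
  | cons row rest ih =>
      intro _
      cases hr : rest with
      | nil =>
          subst hr
          show (row.foldl (fun paths item => paths ++ [[item]]) []) = _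
          rw [PySem.List.foldl_append_singleton_eq_map]
          simp [dfs_alt]
      | cons a t =>
          rw [dfs_cons row (a :: t) (by simp), dfs_alt_cons row (a :: t) (by simp)]
          rw [hr] at ih
          rw [ih (by simp)]

-- ===== VERDICT (by name: the statement is the Claim_ definition above) =====
theorem dfs_spec : Claim_equal_dfs := by
  intro matrix _ hpre
  exact dfs_eq_alt matrix hpre
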